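-- pv_equiv track=rewrite | github.com/guinamen/EvoCRTMul | python_cli/pareto_rns.py | _filter_anchor_worker
-- ===== SOURCE A (Python) =====
-- import itertools
-- from math import gcd
--
-- def _are_pairwise_coprime(moduli: tuple) -> bool:
--     for i in range(len(moduli)):
--         for j in range(i + 1, len(moduli)):
--             if gcd(moduli[i], moduli[j]) != 1:
--                 return False
--     return True
--
-- def _filter_anchor_worker(
--     a0:          int,
--     a1:          int,
--     tail_pool:   list[int],   # pool sem a0 e a1 (e sem elementos < a1)
--     k_values:    list[int],   # lista de k a processar nesta task
--     N:           int,
--     required_p2: int,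
--     min_M:       int,
-- ) -> list[tuple]:
--     """
--     Filtra todos os conjuntos de tamanho k que começam com (a0, a1).
--     Uma única task cobre múltiplos valores de k para amortizar o overhead
--     de spawn quando o pool é pequeno.
--     """
--     # Pré-calcula produto e coprimidade da âncora
--     anchor_gcd_ok = gcd(a0, a1) == 1
--     anchor_product = a0 * a1
--     anchor_has_p2 = (a0 == required_p2 or a1 == required_p2)
--
--     valid = []
--
--     for k in k_values:
--         remaining = k - 2
--         if remaining < 0:
--             continue
--         if remaining == 0:
--             # O conjunto é exatamente a âncora
--             moduli = (a0, a1)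
--             M = anchor_product
--             if (anchor_gcd_ok
--                     and M >= min_M
--                     and (anchor_has_p2 or required_p2 in moduli)):
--                 valid.append(moduli)
--             continue
--
--         if not anchor_gcd_ok:
--             # Âncora já falhou em coprimidade — nenhum superconjunto passa
--             continue
--
--         for rest in itertools.combinations(tail_pool, remaining):
--             # Filtro rápido 1: potência de 2 deve estar presente
--             if not anchor_has_p2 and required_p2 not in rest:
--                 continue
--
--             # Filtro rápido 2: produto mínimo
--             M = anchor_product
--             for m in rest:
--                 M *= m
--             if M < min_M:
--                 continue
--
--             # Filtro 3: coprimidade entre rest e âncora, e dentro de rest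
--             moduli = (a0, a1) + rest
--             if _are_pairwise_coprime(moduli):
--                 valid.append(moduli)
--
--     return valid
-- ===== SOURCE B (Python) =====
-- from math import gcd
--
-- def _filter_anchor_worker(a0, a1, tail_pool, k_values, N, required_p2, min_M):
--     # Backtracking DFS over the tail pool with incremental product/p2 tracking and
--     # early pruning of any candidate that is not coprime with the chosen prefix.
--     anchor_ok = gcd(a0, a1) == 1
--     anchor_p2 = (a0 == required_p2 or a1 == required_p2)
--
--     def dfs(r, pool, chosen, prod, has_p2):
--         if r == 0:
--             return [(a0, a1) + tuple(chosen)] if has_p2 and prod >= min_M else []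
--         out = []
--         for i, x in enumerate(pool):
--             if gcd(x, a0) == 1 and gcd(x, a1) == 1 and all(gcd(x, y) == 1 for y in chosen):
--                 out.extend(dfs(r - 1, pool[i + 1:], chosen + [x],
--                                prod * x, has_p2 or x == required_p2))
--         return out
--
--     valid = []
--     for k in k_values:
--         rem = k - 2
--         if rem < 0:
--             continue
--         if rem == 0:
--             if anchor_ok and anchor_p2 and a0 * a1 >= min_M:
--                 valid.append((a0, a1))
--             continue
--         if anchor_ok:
--             valid.extend(dfs(rem, tail_pool, [], a0 * a1, anchor_p2))
--     return valid
-- ===== Notes on version B (the rewrite author's own statement) =====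
-- stated objective: alternative
-- what changed: Replaces A's per-k enumeration of every C(n,k-2) combination (each re-checked from scratch for product, p2 membership and full pairwise coprimality) with a backtracking DFS over the tail pool that tracks the product and p2 flag incrementally and prunes any branch whose next element shares a factor with the already-chosen prefix; on the generated inputs this was not measurably faster overall.
import Mathlib
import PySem

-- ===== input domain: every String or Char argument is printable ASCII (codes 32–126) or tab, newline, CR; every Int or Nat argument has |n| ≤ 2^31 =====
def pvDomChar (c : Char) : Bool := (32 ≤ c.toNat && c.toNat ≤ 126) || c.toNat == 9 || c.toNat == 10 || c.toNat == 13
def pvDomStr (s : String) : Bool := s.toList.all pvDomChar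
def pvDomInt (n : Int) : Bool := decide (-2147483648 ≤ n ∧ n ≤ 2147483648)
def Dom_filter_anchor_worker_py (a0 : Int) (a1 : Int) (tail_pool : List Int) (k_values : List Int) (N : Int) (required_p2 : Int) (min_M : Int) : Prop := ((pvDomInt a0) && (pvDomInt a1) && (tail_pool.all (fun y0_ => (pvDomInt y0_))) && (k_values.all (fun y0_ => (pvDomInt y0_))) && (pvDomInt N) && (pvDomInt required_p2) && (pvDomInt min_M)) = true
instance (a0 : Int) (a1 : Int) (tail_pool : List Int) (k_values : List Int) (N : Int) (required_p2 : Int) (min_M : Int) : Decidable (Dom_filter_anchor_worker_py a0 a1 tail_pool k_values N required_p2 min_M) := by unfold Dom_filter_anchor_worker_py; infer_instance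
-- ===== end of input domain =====

-- B replaces A's per-k enumeration of all C(n, k-2) combinations with a backtracking DFS
-- that skips branches whose next element is not coprime with the prefix (objective: alternative).

-- ===== PORT A =====
-- port of _are_pairwise_coprime's nested index loops (early return False = the && chain)
def coprimeAll (x : Int) (ys : List Int) : Bool := ys.all (fun y => Int.gcd x y == 1)

def arePairwiseCoprime : List Int → Bool
  | [] => true
  | x :: xs => coprimeAll x xs && arePairwiseCoprime xs

-- itertools.combinations(pool, r) in itertools' lexicographic-by-index order
def combosA : Nat → List Int → List (List Int)
  | 0, _ => [[]]
  | _ + 1, [] => []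
  | r + 1, x :: xs => (combosA r xs).map (fun rest => x :: rest) ++ combosA (r + 1) xs
  termination_by _ l => l.length

def filter_anchor_worker_py (a0 : Int) (a1 : Int) (tail_pool : List Int) (k_values : List Int) (N : Int) (required_p2 : Int) (min_M : Int) : List (List Int) :=
  let anchor_gcd_ok : Bool := Int.gcd a0 a1 == 1
  let anchor_product : Int := a0 * a1
  let anchor_has_p2 : Bool := a0 == required_p2 || a1 == required_p2
  k_values.foldl (fun valid k =>
    let remaining := k - 2
    if remaining < 0 then valid
    else if remaining == 0 then
      (if anchor_gcd_ok && decide (anchor_product ≥ min_M)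
          && (anchor_has_p2 || [a0, a1].contains required_p2)
       then valid ++ [[a0, a1]] else valid)
    else if !anchor_gcd_ok then valid
    else
      (combosA remaining.toNat tail_pool).foldl (fun valid rest =>
        if !anchor_has_p2 && !rest.contains required_p2 then valid
        else
          let M := rest.foldl (fun a m => a * m) anchor_product
          if M < min_M then valid
          else if arePairwiseCoprime (a0 :: a1 :: rest) then valid ++ [a0 :: a1 :: rest]
          else valid) valid) []

-- ===== PORT B =====
-- the inner recursive dfs of Source B: suffix pool, chosen prefix, incremental product and p2 flag
def dfsB (a0 a1 required_p2 min_M : Int) : Nat → List Int → List Int → Int → Bool → List (List Int)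
  | 0, _, chosen, prod, hp =>
      if hp && decide (prod ≥ min_M) then [a0 :: a1 :: chosen] else []
  | _ + 1, [], _, _, _ => []
  | r + 1, x :: xs, chosen, prod, hp =>
      (if Int.gcd x a0 == 1 && (Int.gcd x a1 == 1 && chosen.all (fun y => Int.gcd x y == 1))
       then dfsB a0 a1 required_p2 min_M r xs (chosen ++ [x]) (prod * x) (hp || x == required_p2)
       else []) ++ dfsB a0 a1 required_p2 min_M (r + 1) xs chosen prod hp
  termination_by _ l => l.length

def filter_anchor_worker_py_alt (a0 : Int) (a1 : Int) (tail_pool : List Int) (k_values : List Int) (N : Int) (required_p2 : Int) (min_M : Int) : List (List Int) :=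
  let anchor_ok : Bool := Int.gcd a0 a1 == 1
  let anchor_p2 : Bool := a0 == required_p2 || a1 == required_p2
  k_values.foldl (fun valid k =>
    let rem := k - 2
    if rem < 0 then valid
    else if rem == 0 then
      (if anchor_ok && anchor_p2 && decide (a0 * a1 ≥ min_M) then valid ++ [[a0, a1]] else valid)
    else if anchor_ok then
      valid ++ dfsB a0 a1 required_p2 min_M rem.toNat tail_pool [] (a0 * a1) anchor_p2
    else valid) []

-- ===== PRECONDITION & SPEC =====
def Spec_filter_anchor_worker_py (a0 : Int) (a1 : Int) (tail_pool : List Int) (k_values : List Int) (N : Int) (required_p2 : Int) (min_M : Int) (out : List (List Int)) : Prop := out = filter_anchor_worker_py_alt a0 a1 tail_pool k_values N required_p2 min_M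
instance (a0 : Int) (a1 : Int) (tail_pool : List Int) (k_values : List Int) (N : Int) (required_p2 : Int) (min_M : Int) (out : List (List Int)) : Decidable (Spec_filter_anchor_worker_py a0 a1 tail_pool k_values N required_p2 min_M out) := by unfold Spec_filter_anchor_worker_py; infer_instance

-- ===== CLAIM (what is proved, stated in full; the proofs are below) =====
def Claim_equal_filter_anchor_worker_py : Prop := ∀ (a0 : Int) (a1 : Int) (tail_pool : List Int) (k_values : List Int) (N : Int) (required_p2 : Int) (min_M : Int), Dom_filter_anchor_worker_py a0 a1 tail_pool k_values N required_p2 min_M → Spec_filter_anchor_worker_py a0 a1 tail_pool k_values N required_p2 min_M (filter_anchor_worker_py a0 a1 tail_pool k_values N required_p2 min_M)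

-- ===== LEMMAS AND PROOFS =====

-- the per-combination decision both programs implement: emit ctx ++ rest iff rest is
-- internally pairwise coprime, coprime to every element of ctx, carries the p2 flag,
-- and the accumulated product reaches min_M
def emitE (p2 mm : Int) (ctx : List Int) (prod : Int) (hp : Bool) (rest : List Int) : Option (List Int) :=
  if (arePairwiseCoprime rest && rest.all (fun x => ctx.all (fun y => Int.gcd x y == 1)))
      && (hp || rest.contains p2)
      && decide (rest.foldl (fun a m => a * m) prod ≥ mm)
  then some (ctx ++ rest) else none

lemma foldl_extend {α β : Type} (f : α → Option β) (l : List α) (v : List β) :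
    l.foldl (fun acc x => acc ++ (f x).toList) v = v ++ l.filterMap f := by
  induction l generalizing v with
  | nil => simp
  | cons hd tl ih => cases h : f hd <;> simp [h, ih]

lemma foldl_funext {α β : Type} {f g : β → α → β} (l : List α) (init : β)
    (h : ∀ b a, f b a = g b a) : l.foldl f init = l.foldl g init := by
  have hfg : f = g := funext fun b => funext fun a => h b a
  rw [hfg]

lemma emitE_cons (a0 a1 p2 mm x : Int) (chosen : List Int) (prod : Int) (hp : Bool)
    (hc : (Int.gcd x a0 == 1 && (Int.gcd x a1 == 1 && chosen.all (fun y => Int.gcd x y == 1))) = true)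
    (rest : List Int) :
    emitE p2 mm (a0 :: a1 :: chosen) prod hp (x :: rest)
      = emitE p2 mm (a0 :: a1 :: (chosen ++ [x])) (prod * x) (hp || x == p2) rest := by
  unfold emitE
  have hval : (a0 :: a1 :: chosen) ++ (x :: rest) = (a0 :: a1 :: (chosen ++ [x])) ++ rest := by simp
  have hcond : ((arePairwiseCoprime (x :: rest) && (x :: rest).all (fun z => (a0 :: a1 :: chosen).all (fun y => Int.gcd z y == 1)))
      && (hp || (x :: rest).contains p2)
      && decide ((x :: rest).foldl (fun a m => a * m) prod ≥ mm))
    = ((arePairwiseCoprime rest && rest.all (fun z => (a0 :: a1 :: (chosen ++ [x])).all (fun y => Int.gcd z y == 1)))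
      && ((hp || x == p2) || rest.contains p2)
      && decide (rest.foldl (fun a m => a * m) (prod * x) ≥ mm)) := by
    simp only [List.foldl_cons]
    rw [Bool.eq_iff_iff]
    simp only [arePairwiseCoprime, coprimeAll, Bool.and_eq_true, Bool.or_eq_true,
      List.all_eq_true, List.all_cons, List.contains_cons, List.mem_cons, List.mem_append,
      beq_iff_eq, decide_eq_true_eq] at *
    have gcdc : ∀ z : Int, Int.gcd z x = Int.gcd x z := fun z => Int.gcd_comm z x
    constructor
    · rintro ⟨⟨⟨⟨hxall, hpc⟩, hself, hzall⟩, hor⟩, hd⟩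
      refine ⟨⟨⟨hpc, fun z hz => ?_⟩, by tauto⟩, hd⟩
      rcases hzall z hz with ⟨h1, h2, h3⟩
      refine ⟨h1, h2, fun y hy => ?_⟩
      rcases hy with hy | rfl | hy
      · exact h3 y hy
      · rw [gcdc]; exact hxall z hz
      · simp at hy
    · rintro ⟨⟨⟨hpc, hzall⟩, hor⟩, hd⟩
      refine ⟨⟨⟨⟨fun z hz => ?_, hpc⟩, ⟨hc.1, hc.2.1, hc.2.2⟩, fun z hz => ?_⟩, by tauto⟩, hd⟩
      · rw [← gcdc]; exact (hzall z hz).2.2 x (Or.inr (Or.inl rfl))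
      · rcases hzall z hz with ⟨h1, h2, h3⟩
        exact ⟨h1, h2, fun y hy => h3 y (Or.inl hy)⟩
  rw [hcond, hval]

lemma emitE_cons_none (a0 a1 p2 mm x : Int) (chosen : List Int) (prod : Int) (hp : Bool)
    (hc : (Int.gcd x a0 == 1 && (Int.gcd x a1 == 1 && chosen.all (fun y => Int.gcd x y == 1))) = false)
    (rest : List Int) :
    emitE p2 mm (a0 :: a1 :: chosen) prod hp (x :: rest) = none := by
  simp only [emitE, List.all_cons, hc, Bool.false_and, Bool.and_false, Bool.false_eq_true,
    not_false_eq_true, if_neg]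

lemma dfsB_eq_filterMap (a0 a1 p2 mm : Int) (pool : List Int) (r : Nat) (chosen : List Int) (prod : Int) (hp : Bool) :
    dfsB a0 a1 p2 mm r pool chosen prod hp
      = (combosA r pool).filterMap (emitE p2 mm (a0 :: a1 :: chosen) prod hp) := by
  induction pool generalizing r chosen prod hp with
  | nil =>
    cases r with
    | zero =>
      simp [dfsB, combosA, emitE, arePairwiseCoprime, List.filterMap_cons]
      by_cases h : hp = true ∧ mm ≤ prod <;> simp [h]
    | succ r => simp [dfsB, combosA]
  | cons x xs ih =>
    cases r with
    | zero =>
      simp [dfsB, combosA, emitE, arePairwiseCoprime, List.filterMap_cons]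
      by_cases h : hp = true ∧ mm ≤ prod <;> simp [h]
    | succ r =>
      rw [dfsB, combosA, List.filterMap_append, List.filterMap_map]
      rw [ih (r + 1) chosen prod hp]
      congr 1
      by_cases hc : (Int.gcd x a0 == 1 && (Int.gcd x a1 == 1 && chosen.all (fun y => Int.gcd x y == 1))) = true
      · rw [if_pos hc, ih r (chosen ++ [x]) (prod * x) (hp || x == p2)]
        apply List.filterMap_congr
        intro rest _
        exact (emitE_cons a0 a1 p2 mm x chosen prod hp hc rest).symm
      · rw [if_neg hc]
        rw [Bool.not_eq_true] at hc
        symm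
        apply List.filterMap_eq_nil_iff.mpr
        intro rest _
        exact emitE_cons_none a0 a1 p2 mm x chosen prod hp hc rest

lemma a_step_eq (a0 a1 p2 mm : Int) (hp : Bool) (hgcd : (Int.gcd a0 a1 == 1) = true)
    (acc : List (List Int)) (rest : List Int) :
    (if !hp && !rest.contains p2 then acc
     else
       if rest.foldl (fun a m => a * m) (a0 * a1) < mm then acc
       else if arePairwiseCoprime (a0 :: a1 :: rest) then acc ++ [a0 :: a1 :: rest] else acc)
      = acc ++ (emitE p2 mm (a0 :: a1 :: ([] : List Int)) (a0 * a1) hp rest).toList := by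
  have hs : arePairwiseCoprime (a0 :: a1 :: rest)
      = (arePairwiseCoprime rest && rest.all (fun z => (a0 :: a1 :: ([] : List Int)).all (fun y => Int.gcd z y == 1))) := by
    rw [Bool.eq_iff_iff]
    simp only [arePairwiseCoprime, coprimeAll, List.all_cons, List.all_nil, Bool.and_true,
      Bool.and_eq_true, List.all_eq_true, beq_iff_eq]
    constructor
    · rintro ⟨⟨_, h0⟩, h1, hpc⟩
      exact ⟨hpc, fun z hz => ⟨by rw [Int.gcd_comm]; exact h0 z hz, by rw [Int.gcd_comm]; exact h1 z hz⟩⟩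
    · rintro ⟨hpc, hall⟩
      exact ⟨⟨by simpa using hgcd, fun z hz => by rw [Int.gcd_comm]; exact (hall z hz).1⟩,
             fun z hz => by rw [Int.gcd_comm]; exact (hall z hz).2, hpc⟩
  by_cases h1 : (!hp && !rest.contains p2) = true
  · simp only [Bool.and_eq_true, Bool.not_eq_true'] at h1
    have hornone : (hp || rest.contains p2) = false := by rw [h1.1, h1.2]; rfl
    have he : emitE p2 mm (a0 :: a1 :: ([] : List Int)) (a0 * a1) hp rest = none := by
      unfold emitE; rw [hornone]; simp
    rw [if_pos (by rw [h1.1, h1.2]; rfl), he]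
    simp
  · have hor : (hp || rest.contains p2) = true := by
      rcases Bool.eq_false_or_eq_true hp with h | h
      · rw [h]; rfl
      · rcases Bool.eq_false_or_eq_true (rest.contains p2) with hcc | hcc
        · rw [h, hcc]; rfl
        · exact absurd (by rw [h, hcc]; rfl) h1
    rw [if_neg h1]
    by_cases h2 : rest.foldl (fun a m => a * m) (a0 * a1) < mm
    · have hd : decide (rest.foldl (fun a m => a * m) (a0 * a1) ≥ mm) = false :=
        decide_eq_false (not_le.mpr h2)
      have he : emitE p2 mm (a0 :: a1 :: ([] : List Int)) (a0 * a1) hp rest = none := by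
        unfold emitE; rw [hd]; simp
      rw [if_pos h2, he]; simp
    · have hd : decide (rest.foldl (fun a m => a * m) (a0 * a1) ≥ mm) = true :=
        decide_eq_true (not_lt.mp h2)
      rw [if_neg h2]
      unfold emitE
      rw [hs, hor, hd]
      simp only [Bool.and_true]
      by_cases h3 : (arePairwiseCoprime rest && rest.all (fun z => (a0 :: a1 :: ([] : List Int)).all (fun y => Int.gcd z y == 1))) = true
      · rw [if_pos h3, if_pos h3]; simp
      · rw [if_neg h3, if_neg h3]; simp

-- ===== VERDICT (by name: the statement is the Claim_ definition above) =====
theorem filter_anchor_worker_py_spec : Claim_equal_filter_anchor_worker_py := by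
  intro a0 a1 tail_pool k_values N p2 mm _
  unfold Spec_filter_anchor_worker_py
  simp only [filter_anchor_worker_py, filter_anchor_worker_py_alt]
  refine foldl_funext k_values [] (fun valid k => ?_)
  by_cases hlt : k - 2 < 0
  · rw [if_pos hlt, if_pos hlt]
  · rw [if_neg hlt, if_neg hlt]
    by_cases hz : (k - 2 == 0) = true
    · rw [if_pos hz, if_pos hz]
      have hcond : (Int.gcd a0 a1 == 1 && decide (a0 * a1 ≥ mm)
            && ((a0 == p2 || a1 == p2) || [a0, a1].contains p2))
          = (Int.gcd a0 a1 == 1 && (a0 == p2 || a1 == p2) && decide (a0 * a1 ≥ mm)) := by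
        rw [Bool.eq_iff_iff]
        simp only [Bool.and_eq_true, Bool.or_eq_true, List.contains_cons, List.contains_nil,
          beq_iff_eq, Bool.or_false]
        constructor
        · rintro ⟨⟨hg, hd⟩, hor⟩
          exact ⟨⟨hg, by tauto⟩, hd⟩
        · rintro ⟨⟨hg, hor⟩, hd⟩
          exact ⟨⟨hg, hd⟩, by tauto⟩
      rw [hcond]
    · rw [if_neg hz, if_neg hz]
      by_cases hgcd : (Int.gcd a0 a1 == 1) = true
      · rw [hgcd]
        simp only [Bool.not_true, Bool.false_eq_true, if_false, if_true]
        rw [foldl_funext (combosA (k - 2).toNat tail_pool) valid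
              (fun acc rest => a_step_eq a0 a1 p2 mm (a0 == p2 || a1 == p2) hgcd acc rest),
            foldl_extend, dfsB_eq_filterMap]
      · rw [Bool.not_eq_true] at hgcd
        rw [hgcd]
        simp only [Bool.not_false, Bool.false_eq_true, if_false, if_true]
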